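-- pv_equiv track=rewrite | github.com/xxdarkxx2609/airsoft-prop | src/web/wifi_manager.py | _parse_nmcli_terse
-- ===== SOURCE A (Python) =====
-- def _parse_nmcli_terse(line: str) -> list[str]:
--     """Parse a single line of nmcli terse (-t) output into fields.
--
--     nmcli -t escapes colons as ``\\:`` and backslashes as ``\\\\``
--     inside field values.  A naive ``split(":")`` breaks on SSIDs
--     like ``<:::::]=0`` which become ``<\\:\\:\\:\\:\\:]=0`` in terse
--     output.
--     """
--     fields: list[str] = []
--     current: list[str] = []
--     i = 0
--     while i < len(line):
--         if line[i] == '\\' and i + 1 < len(line):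
--             # Escaped character — keep the literal value
--             current.append(line[i + 1])
--             i += 2
--         elif line[i] == ':':
--             # Unescaped colon — field separator
--             fields.append(''.join(current))
--             current = []
--             i += 1
--         else:
--             current.append(line[i])
--             i += 1
--     fields.append(''.join(current))
--     return fields
-- ===== SOURCE B (Python) =====
-- def _split_raw(line):
--     """Pass 1: split into still-escaped raw fields at unescaped colons."""
--     raws = []
--     start = 0
--     i = 0
--     n = len(line)
--     while i < n:
--         if line[i] == ':':
--             raws.append(line[start:i])
--             start = i + 1
--             i += 1
--         elif line[i] == '\\' and i + 1 < n:
--             i += 2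
--         else:
--             i += 1
--     raws.append(line[start:])
--     return raws
--
--
-- def _unescape(raw):
--     """Pass 2: replace every '\\x' by 'x'; a trailing lone backslash stays."""
--     out = []
--     i = 0
--     while i < len(raw):
--         if raw[i] == '\\' and i + 1 < len(raw):
--             out.append(raw[i + 1])
--             i += 2
--         else:
--             out.append(raw[i])
--             i += 1
--     return ''.join(out)
--
--
-- def _parse_nmcli_terse(line: str) -> list[str]:
--     return [_unescape(raw) for raw in _split_raw(line)]
-- ===== Notes on version B (the rewrite author's own statement) =====
-- stated objective: idiomatic
-- what changed: Replaced A's single fused scan (which unescapes while accumulating the current field) by two distinct passes: first split the line into raw still-escaped fields at unescaped colons, then map a general unescape step over each raw field.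
import Mathlib
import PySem

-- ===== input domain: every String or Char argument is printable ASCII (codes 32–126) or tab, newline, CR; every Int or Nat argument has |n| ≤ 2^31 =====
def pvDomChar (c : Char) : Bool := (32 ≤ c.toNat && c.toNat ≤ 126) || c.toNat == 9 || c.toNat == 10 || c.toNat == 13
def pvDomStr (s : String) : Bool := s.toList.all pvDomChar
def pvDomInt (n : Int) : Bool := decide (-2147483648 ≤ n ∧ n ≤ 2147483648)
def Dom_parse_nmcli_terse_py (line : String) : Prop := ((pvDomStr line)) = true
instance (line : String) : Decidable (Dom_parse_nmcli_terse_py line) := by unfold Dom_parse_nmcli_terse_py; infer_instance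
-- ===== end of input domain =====

-- B replaces A's fused unescape-while-splitting scan by two passes (split into raw
-- fields at unescaped colons, then unescape each field); objective: idiomatic.

-- ===== PORT A =====
-- A's while loop: one fused scan; `cur` is the unescaped current field, `fields` the output so far.
def pvGoA : List Char → List Char → List String → List String
  | [], cur, fields => fields ++ [String.mk cur]
  | [c], cur, fields =>
      -- i+1 < len(line) is false here, so '\' is not treated as an escape
      if c = ':' then (fields ++ [String.mk cur]) ++ [String.mk []]
      else fields ++ [String.mk (cur ++ [c])]
  | c :: d :: rest, cur, fields =>
      if c = '\\' then pvGoA rest (cur ++ [d]) fields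
      else if c = ':' then pvGoA (d :: rest) [] (fields ++ [String.mk cur])
      else pvGoA (d :: rest) (cur ++ [c]) fields

def parse_nmcli_terse_py (line : String) : List String :=
  pvGoA line.toList [] []

-- ===== PORT B =====
-- prepend a char to the first raw field
def pvConsHead (c : Char) : List (List Char) → List (List Char)
  | [] => [[c]]
  | x :: xs => (c :: x) :: xs

-- prepend an escape pair to the first raw field
def pvConsHead2 (c d : Char) : List (List Char) → List (List Char)
  | [] => [[c, d]]
  | x :: xs => (c :: d :: x) :: xs

-- pass 1: split into still-escaped raw fields at unescaped colons
def pvSplitRaw : List Char → List (List Char)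
  | [] => [[]]
  | c :: rest =>
      if c = ':' then [] :: pvSplitRaw rest
      else if c = '\\' then
        match rest with
        | [] => [[c]]
        | d :: rest' => pvConsHead2 c d (pvSplitRaw rest')
      else pvConsHead c (pvSplitRaw rest)

-- pass 2: replace every '\x' by 'x'; a trailing lone backslash stays
def pvUnescape : List Char → List Char
  | [] => []
  | [c] => [c]
  | c :: d :: rest =>
      if c = '\\' then d :: pvUnescape rest
      else c :: pvUnescape (d :: rest)

def parse_nmcli_terse_py_alt (line : String) : List String :=
  (pvSplitRaw line.toList).map (fun raw => String.mk (pvUnescape raw))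

-- ===== PRECONDITION & SPEC =====
def Spec_parse_nmcli_terse_py (line : String) (out : List String) : Prop := out = parse_nmcli_terse_py_alt line
instance (line : String) (out : List String) : Decidable (Spec_parse_nmcli_terse_py line out) := by unfold Spec_parse_nmcli_terse_py; infer_instance

-- ===== CLAIM (what is proved, stated in full; the proofs are below) =====
def Claim_equal_parse_nmcli_terse_py : Prop := ∀ (line : String), Dom_parse_nmcli_terse_py line → Spec_parse_nmcli_terse_py line (parse_nmcli_terse_py line)

-- ===== LEMMAS AND PROOFS =====

def pvMapHead (f : List Char → List Char) : List (List Char) → List (List Char)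
  | [] => []
  | x :: xs => f x :: xs

theorem pvSplitRaw_ne_nil (cs : List Char) : pvSplitRaw cs ≠ [] := by
  match cs with
  | [] => simp [pvSplitRaw]
  | c :: rest =>
      unfold pvSplitRaw
      split_ifs with h1 h2
      · simp
      · match rest with
        | [] => simp
        | d :: rest' =>
            have := pvSplitRaw_ne_nil rest'
            cases h : pvSplitRaw rest' with
            | nil => exact absurd h this
            | cons x xs => simp [pvConsHead2, h]
      · have := pvSplitRaw_ne_nil rest
        cases h : pvSplitRaw rest with
        | nil => exact absurd h this
        | cons x xs => simp [pvConsHead, h]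

theorem pvGoA_eq (cs cur : List Char) (fields : List String) :
    pvGoA cs cur fields =
      fields ++ (pvMapHead (cur ++ ·) ((pvSplitRaw cs).map pvUnescape)).map String.mk := by
  induction cs, cur, fields using pvGoA.induct with
  | case1 cur fields => simp [pvGoA, pvSplitRaw, pvUnescape, pvMapHead]
  | case2 cur fields => simp [pvGoA, pvSplitRaw, pvUnescape, pvMapHead]
  | case3 c cur fields hc =>
      by_cases hbs : c = '\\'
      · subst hbs
        simp [pvGoA, hc, pvSplitRaw, pvUnescape, pvMapHead]
      · simp [pvGoA, hc, pvSplitRaw, hbs, pvConsHead, pvUnescape, pvMapHead]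
  | case4 d rest cur fields ih =>
      rw [show pvGoA ('\\' :: d :: rest) cur fields = pvGoA rest (cur ++ [d]) fields from by
        simp [pvGoA]]
      rw [ih]
      cases h : pvSplitRaw rest with
      | nil => exact absurd h (pvSplitRaw_ne_nil rest)
      | cons x xs => simp [pvSplitRaw, pvConsHead2, h, pvUnescape, pvMapHead]
  | case5 d rest cur fields _ ih =>
      rw [show pvGoA (':' :: d :: rest) cur fields
            = pvGoA (d :: rest) [] (fields ++ [String.mk cur]) from by simp [pvGoA]]
      rw [ih]
      cases h : pvSplitRaw (d :: rest) with
      | nil => exact absurd h (pvSplitRaw_ne_nil (d :: rest))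
      | cons x xs => simp [pvSplitRaw, h, pvUnescape, pvMapHead]
  | case6 c d rest cur fields hbs hcol ih =>
      rw [show pvGoA (c :: d :: rest) cur fields
            = pvGoA (d :: rest) (cur ++ [c]) fields from by simp [pvGoA, hbs, hcol]]
      rw [ih]
      cases h : pvSplitRaw (d :: rest) with
      | nil => exact absurd h (pvSplitRaw_ne_nil (d :: rest))
      | cons x xs =>
          have hx : pvUnescape (c :: x) = c :: pvUnescape x := by
            match x with
            | [] => simp [pvUnescape]
            | y :: ys => simp [pvUnescape, hbs]
          simp [pvSplitRaw, hcol, hbs, pvConsHead, h, hx, pvMapHead]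

-- ===== VERDICT (by name: the statement is the Claim_ definition above) =====
theorem parse_nmcli_terse_py_spec : Claim_equal_parse_nmcli_terse_py := by
  intro line _
  show parse_nmcli_terse_py line = parse_nmcli_terse_py_alt line
  unfold parse_nmcli_terse_py parse_nmcli_terse_py_alt
  rw [pvGoA_eq]
  have hne := pvSplitRaw_ne_nil line.toList
  cases h : pvSplitRaw line.toList with
  | nil => exact absurd h hne
  | cons x xs => simp [pvMapHead]
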